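-- pv_equiv track=rewrite | github.com/itschurry/wealth-pulse | apps/api/services/market_data_service.py | _overseas_exchange_candidates
-- ===== SOURCE A (Python) =====
-- def _overseas_exchange_candidates(market: str) -> list[str]:
--     normalized = (market or "").strip().upper()
--     if normalized in {"NYSE", "AMEX", "NASDAQ"}:
--         ordered = [normalized, "NASDAQ", "NYSE", "AMEX"]
--     elif normalized in {"NAS", "US", "USA", ""}:
--         ordered = ["NASDAQ", "NYSE", "AMEX"]
--     else:
--         ordered = ["NASDAQ", "NYSE", "AMEX"]
--     deduped: list[str] = []
--     for item in ordered:
--         if item not in deduped: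
--             deduped.append(item)
--     return deduped
-- ===== SOURCE B (Python) =====
-- _EXCHANGE_TABLE = {
--     "NASDAQ": ["NASDAQ", "NYSE", "AMEX"],
--     "NYSE": ["NYSE", "NASDAQ", "AMEX"],
--     "AMEX": ["AMEX", "NASDAQ", "NYSE"],
-- }
--
--
-- def _overseas_exchange_candidates(market: str) -> list[str]:
--     normalized = (market or "").strip().upper()
--     return list(_EXCHANGE_TABLE.get(normalized, ["NASDAQ", "NYSE", "AMEX"]))
-- ===== Notes on version B (the rewrite author's own statement) =====
-- stated objective: simpler
-- what changed: Replaces the branch chain plus explicit dedup loop with a precomputed module-level table mapping each named exchange to its already-deduped ordered list, returning a fresh copy of the looked-up (or default) list.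
import Mathlib
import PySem

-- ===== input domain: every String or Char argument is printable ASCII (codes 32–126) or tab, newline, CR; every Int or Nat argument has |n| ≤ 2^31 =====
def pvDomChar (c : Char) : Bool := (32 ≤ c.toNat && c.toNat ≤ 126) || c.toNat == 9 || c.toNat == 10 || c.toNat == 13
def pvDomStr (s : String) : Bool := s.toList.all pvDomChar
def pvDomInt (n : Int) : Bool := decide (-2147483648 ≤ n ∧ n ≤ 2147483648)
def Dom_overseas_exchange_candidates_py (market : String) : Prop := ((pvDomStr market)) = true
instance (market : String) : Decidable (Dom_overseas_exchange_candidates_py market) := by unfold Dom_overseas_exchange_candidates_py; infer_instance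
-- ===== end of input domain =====

-- B replaces A's branch chain and explicit dedup loop with a precomputed table of
-- already-deduped ordered candidate lists (objective: simpler).

-- ===== PORT A =====
def overseas_exchange_candidates_py (market : String) : List String :=
  let normalized := PySem.Str.upper (PySem.Str.strip market)
  let ordered :=
    if normalized = "NYSE" ∨ normalized = "AMEX" ∨ normalized = "NASDAQ" then
      [normalized, "NASDAQ", "NYSE", "AMEX"]
    else if normalized = "NAS" ∨ normalized = "US" ∨ normalized = "USA" ∨ normalized = "" then
      ["NASDAQ", "NYSE", "AMEX"]
    else
      ["NASDAQ", "NYSE", "AMEX"]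
  ordered.foldl (fun deduped item => if item ∈ deduped then deduped else deduped ++ [item]) []

-- ===== PORT B =====
def pvExchangeTable : PySem.Dict String (List String) :=
  PySem.Dict.ofList
    [("NASDAQ", ["NASDAQ", "NYSE", "AMEX"]),
     ("NYSE", ["NYSE", "NASDAQ", "AMEX"]),
     ("AMEX", ["AMEX", "NASDAQ", "NYSE"])]

def overseas_exchange_candidates_py_alt (market : String) : List String :=
  let normalized := PySem.Str.upper (PySem.Str.strip market)
  PySem.Dict.getD pvExchangeTable normalized ["NASDAQ", "NYSE", "AMEX"]

-- ===== PRECONDITION & SPEC =====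
def Spec_overseas_exchange_candidates_py (market : String) (out : List String) : Prop := out = overseas_exchange_candidates_py_alt market
instance (market : String) (out : List String) : Decidable (Spec_overseas_exchange_candidates_py market out) := by unfold Spec_overseas_exchange_candidates_py; infer_instance

-- ===== CLAIM (what is proved, stated in full; the proofs are below) =====
def Claim_equal_overseas_exchange_candidates_py : Prop := ∀ (market : String), Dom_overseas_exchange_candidates_py market → Spec_overseas_exchange_candidates_py market (overseas_exchange_candidates_py market)

-- ===== LEMMAS AND PROOFS =====
theorem pv_table_eq (n : String) :
    (let ordered :=
      if n = "NYSE" ∨ n = "AMEX" ∨ n = "NASDAQ" then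
        [n, "NASDAQ", "NYSE", "AMEX"]
      else if n = "NAS" ∨ n = "US" ∨ n = "USA" ∨ n = "" then
        ["NASDAQ", "NYSE", "AMEX"]
      else
        ["NASDAQ", "NYSE", "AMEX"]
     ordered.foldl (fun deduped item => if item ∈ deduped then deduped else deduped ++ [item]) [])
    = PySem.Dict.getD pvExchangeTable n ["NASDAQ", "NYSE", "AMEX"] := by
  by_cases h1 : n = "NYSE"
  · subst h1; decide
  by_cases h2 : n = "AMEX"
  · subst h2; decide
  by_cases h3 : n = "NASDAQ"
  · subst h3; decide
  have ht : pvExchangeTable = PySem.Dict.mk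
      [("NASDAQ", ["NASDAQ", "NYSE", "AMEX"]),
       ("NYSE", ["NYSE", "NASDAQ", "AMEX"]),
       ("AMEX", ["AMEX", "NASDAQ", "NYSE"])] := by decide
  simp [ht, PySem.Dict.getD, PySem.Dict.get?, h1, h2, h3, Ne.symm h1, Ne.symm h2, Ne.symm h3]

-- ===== VERDICT (by name: the statement is the Claim_ definition above) =====
theorem overseas_exchange_candidates_py_spec : Claim_equal_overseas_exchange_candidates_py := by
  intro market _
  unfold Spec_overseas_exchange_candidates_py overseas_exchange_candidates_py overseas_exchange_candidates_py_alt
  exact pv_table_eq _
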